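-- pv_equiv track=rewrite | github.com/cbg-ethz/pMHN | src/pmhn/_trees/_backend_jax_ragged/_wrapper.py | _layer_ptr_from_layers
-- ===== SOURCE A (Python) =====
-- def _layer_ptr_from_layers(node_layer: list[int]) -> list[int]:
--     if len(node_layer) == 0:
--         return [0]
--
--     max_layer = max(node_layer)
--     counts = [0 for _ in range(max_layer + 1)]
--
--     for layer_idx in node_layer:
--         if layer_idx < 0:
--             raise ValueError(f"Layer index has to be non-negative, got {layer_idx}.")
--         counts[layer_idx] += 1
--
--     layer_ptr = [0]
--     running = 0
--     for c in counts:
--         running += c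
--         layer_ptr.append(running)
--     return layer_ptr
-- ===== SOURCE B (Python) =====
-- def _layer_ptr_from_layers(node_layer: list[int]) -> list[int]:
--     if not node_layer:
--         return [0]
--     bad = [x for x in node_layer if x < 0]
--     if bad:
--         raise ValueError(f"Layer index has to be non-negative, got {bad[0]}.")
--     m = max(node_layer)
--     return [len([x for x in node_layer if x < k]) for k in range(m + 2)]
-- ===== Notes on version B (the rewrite author's own statement) =====
-- stated objective: alternative
-- what changed: Replaces the bucket-count array plus running prefix-sum loop by a direct rank formulation: entry k of the pointer array is computed as the number of layers strictly below k.
import Mathlib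
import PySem

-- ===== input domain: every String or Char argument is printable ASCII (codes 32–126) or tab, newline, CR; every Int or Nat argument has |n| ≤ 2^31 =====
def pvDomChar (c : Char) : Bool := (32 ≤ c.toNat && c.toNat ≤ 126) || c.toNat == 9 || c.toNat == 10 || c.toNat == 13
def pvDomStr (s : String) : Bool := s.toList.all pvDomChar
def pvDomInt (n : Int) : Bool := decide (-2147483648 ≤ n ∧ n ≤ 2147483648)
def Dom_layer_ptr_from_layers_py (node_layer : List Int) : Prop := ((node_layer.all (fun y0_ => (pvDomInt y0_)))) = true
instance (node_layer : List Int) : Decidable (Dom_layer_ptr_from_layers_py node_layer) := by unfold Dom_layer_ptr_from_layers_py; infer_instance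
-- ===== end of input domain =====

-- B replaces A's bucket-count array + running prefix-sum loop by a direct rank
-- formulation: entry k is the number of layers strictly below k (alternative, not faster).

-- ===== PORT A =====
def layer_ptr_from_layers_py (node_layer : List Int) : List Int :=
  if node_layer.length = 0 then [0]
  else
    match PySem.List.max? node_layer (fun x => x) with
    | none => [0]  -- unreachable: the list is nonempty
    | some max_layer =>
      let counts : List Int := (PySem.List.pyRange 0 (max_layer + 1) 1).map (fun _ => 0)
      -- Python raises ValueError on a negative layer_idx (excluded by Pre_); under Pre_
      -- 0 ≤ layer_idx ≤ max_layer, so the '.toNat' indexing of counts[layer_idx] += 1 is exact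
      let counts := node_layer.foldl
        (fun c layer_idx => c.set layer_idx.toNat (c.getD layer_idx.toNat 0 + 1)) counts
      (counts.foldl (fun (p : List Int × Int) c => (p.1 ++ [p.2 + c], p.2 + c)) ([0], 0)).1

-- ===== PORT B =====
def layer_ptr_from_layers_py_alt (node_layer : List Int) : List Int :=
  if node_layer.isEmpty then [0]
  else if (node_layer.filter (fun x => x < 0)).isEmpty then
    match PySem.List.max? node_layer (fun x => x) with
    | none => [0]  -- unreachable: the list is nonempty
    | some m =>
      (PySem.List.pyRange 0 (m + 2) 1).map
        (fun k => ((node_layer.filter (fun x => x < k)).length : Int))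
  else []  -- Python B raises ValueError here; excluded by Pre_

-- ===== PRECONDITION & SPEC =====
-- Pre_ excludes exactly the inputs with a negative entry, on which Python A raises ValueError.
def Pre_layer_ptr_from_layers_py (node_layer : List Int) : Prop :=
  ∀ x ∈ node_layer, 0 ≤ x
instance (node_layer : List Int) : Decidable (Pre_layer_ptr_from_layers_py node_layer) := by
  unfold Pre_layer_ptr_from_layers_py; infer_instance
def pvWitness_layer_ptr_from_layers_py : List Int := [0, 2, 1, 2]

def Spec_layer_ptr_from_layers_py (node_layer : List Int) (out : List Int) : Prop := out = layer_ptr_from_layers_py_alt node_layer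
instance (node_layer : List Int) (out : List Int) : Decidable (Spec_layer_ptr_from_layers_py node_layer out) := by unfold Spec_layer_ptr_from_layers_py; infer_instance

-- ===== CLAIM (what is proved, stated in full; the proofs are below) =====
def Claim_equal_layer_ptr_from_layers_py : Prop := ∀ (node_layer : List Int), Dom_layer_ptr_from_layers_py node_layer → Pre_layer_ptr_from_layers_py node_layer → Spec_layer_ptr_from_layers_py node_layer (layer_ptr_from_layers_py node_layer)

-- ===== LEMMAS AND PROOFS =====

-- running prefix sums, proof-side characterisation of A's second loop
def pvPref (r : Int) : List Int → List Int
  | [] => []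
  | c :: cs => (r + c) :: pvPref (r + c) cs

lemma pvPref_length (cs : List Int) : ∀ r, (pvPref r cs).length = cs.length := by
  induction cs with
  | nil => intro r; rfl
  | cons c cs ih => intro r; simp [pvPref, ih]

lemma foldl_pref (cs : List Int) : ∀ (p : List Int) (r : Int),
    cs.foldl (fun (q : List Int × Int) c => (q.1 ++ [q.2 + c], q.2 + c)) (p, r)
      = (p ++ pvPref r cs, r + cs.sum) := by
  induction cs with
  | nil => intro p r; simp [pvPref]
  | cons c cs ih =>
    intro p r
    simp only [List.foldl_cons, ih, pvPref, List.sum_cons, Prod.mk.injEq]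
    exact ⟨by simp, by ring⟩

lemma pvPref_getElem (cs : List Int) : ∀ (r : Int) (j : Nat) (h : j < cs.length),
    (pvPref r cs)[j]'(by rw [pvPref_length]; exact h) = r + (cs.take (j + 1)).sum := by
  induction cs with
  | nil => intro r j h; simp at h
  | cons c cs ih =>
    intro r j h
    cases j with
    | zero => simp [pvPref]
    | succ j =>
      have := ih (r + c) j (by simpa using h)
      simp [pvPref, this]
      ring

lemma counts_fold_spec (xs : List Int) : ∀ (c : List Int),
    (∀ x ∈ xs, 0 ≤ x ∧ x.toNat < c.length) →
    (xs.foldl (fun c layer_idx => c.set layer_idx.toNat (c.getD layer_idx.toNat 0 + 1)) c).length = c.length ∧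
    ∀ i : Nat, i < c.length →
      (xs.foldl (fun c layer_idx => c.set layer_idx.toNat (c.getD layer_idx.toNat 0 + 1)) c).getD i 0
        = c.getD i 0 + (xs.countP (fun x => x = (i : Int)) : Int) := by
  induction xs with
  | nil => intro c _; exact ⟨rfl, fun i _ => by simp⟩
  | cons x xs ih =>
    intro c hc
    have hx := hc x (List.mem_cons_self)
    set c' := c.set x.toNat (c.getD x.toNat 0 + 1) with hc'
    have hlen' : c'.length = c.length := by simp [hc']
    have h' : ∀ y ∈ xs, 0 ≤ y ∧ y.toNat < c'.length := by
      intro y hy; rw [hlen']; exact hc y (List.mem_cons_of_mem _ hy)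
    obtain ⟨hL, hI⟩ := ih c' h'
    refine ⟨by simpa [hlen'] using hL, ?_⟩
    intro i hi
    have hi' : i < c'.length := by rwa [hlen']
    have := hI i hi'
    simp only [List.foldl_cons, ← hc']
    rw [this]
    have hget : c'.getD i 0 = (if x.toNat = i then c.getD i 0 + 1 else c.getD i 0) := by
      rw [hc']
      by_cases h : x.toNat = i
      · subst h
        rw [List.getD_eq_getElem _ _ (by simpa [hlen'] using hi)]
        conv_rhs => rw [List.getD_eq_getElem _ _ hx.2]
        simp [List.getElem?_eq_getElem hx.2]
      · rcases lt_or_ge i c.length with h2 | h2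
        · rw [List.getD_eq_getElem _ _ (by simpa using h2),
              List.getD_eq_getElem _ _ h2]
          simp [h]
        · omega
    rw [hget, List.countP_cons]
    by_cases h : x = (i : Int)
    · have : x.toNat = i := by omega
      simp [h]
      ring
    · have hne : x.toNat ≠ i := by omega
      simp [h, hne]

lemma countP_lt_succ (xs : List Int) (k : Nat) :
    xs.countP (fun x => x < ((k : Int) + 1))
      = xs.countP (fun x => x < (k : Int)) + xs.countP (fun x => x = (k : Int)) := by
  induction xs with
  | nil => simp
  | cons x xs ih =>
    simp only [List.countP_cons, ih]
    by_cases h1 : x < (k : Int)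
    · have h3 : x < (k : Int) + 1 := by omega
      have h2 : ¬ x = (k : Int) := by omega
      simp [h1, h2, h3]; omega
    · by_cases h2 : x = (k : Int)
      · have h3 : x < (k : Int) + 1 := by omega
        simp [h2]; omega
      · have h3 : ¬ x < (k : Int) + 1 := by omega
        simp [h1, h2, h3]

-- ===== VERDICT (by name: the statement is the Claim_ definition above) =====
theorem layer_ptr_from_layers_py_spec : Claim_equal_layer_ptr_from_layers_py := by
  intro node_layer _ hpre
  unfold Spec_layer_ptr_from_layers_py layer_ptr_from_layers_py layer_ptr_from_layers_py_alt
  by_cases hN : node_layer = []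
  · subst hN; simp
  set xs := node_layer with hxs
  have hfilt : (xs.filter (fun x => x < 0)).isEmpty = true := by
    rw [List.isEmpty_iff, List.filter_eq_nil_iff]
    intro x hx
    simpa using not_lt.mpr (hpre x hx)
  rcases hmax : PySem.List.max? xs (fun x => x) with _ | m
  · exact absurd ((PySem.List.max?_eq_none_iff _ _).mp hmax) hN
  have hm0 : 0 ≤ m := hpre m (PySem.List.max?_mem hmax)
  have hle : ∀ x ∈ xs, x ≤ m := fun x hx => PySem.List.max?_isMax hmax x hx
  rw [if_neg (by simpa using hN), if_neg (by simpa [List.isEmpty_iff] using hN),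
      if_pos hfilt]
  set n := (m + 1).toNat with hn
  -- initial counts array is n zeros
  have hc0 : (PySem.List.pyRange 0 (m + 1) 1).map (fun _ => (0 : Int)) = List.replicate n (0 : Int) := by
    rw [List.eq_replicate_iff]
    constructor
    · simp [PySem.List.length_pyRange_one, hn]
    · intro b hb
      simp at hb
      exact hb.2
  dsimp only
  rw [hc0]
  have hcspec := counts_fold_spec xs (List.replicate n (0 : Int)) (by
    intro x hx
    have h1 := hpre x hx
    have h2 := hle x hx
    refine ⟨h1, ?_⟩
    rw [List.length_replicate]
    omega)
  obtain ⟨hL, hI⟩ := hcspec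
  set cf := xs.foldl (fun c layer_idx => c.set layer_idx.toNat (c.getD layer_idx.toNat 0 + 1))
    (List.replicate n (0 : Int)) with hcf
  have hLn : cf.length = n := by rw [hL, List.length_replicate]
  rw [foldl_pref]
  -- cumulative sums of cf count the elements strictly below k
  have key : ∀ k : Nat, k ≤ n → (cf.take k).sum = (xs.countP (fun x => x < (k : Int)) : Int) := by
    intro k
    induction k with
    | zero =>
      intro _
      have h0 : xs.countP (fun x => x < (0 : Int)) = 0 :=
        List.countP_eq_zero.mpr (fun x hx => by simpa using not_lt.mpr (hpre x hx))
      simp [h0]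
    | succ k ihk =>
      intro hk
      have hk' : k < cf.length := by omega
      rw [List.take_add_one, List.sum_append, List.getElem?_eq_getElem hk']
      simp only [Option.toList_some, List.sum_cons, List.sum_nil, add_zero]
      rw [ihk (by omega)]
      have hgd := hI k (by rw [List.length_replicate]; omega)
      have hgd2 : cf.getD k 0 = (xs.countP (fun x => x = (k : Int)) : Int) := by
        rw [hgd]; simp
      have hge : cf[k] = cf.getD k 0 := (List.getD_eq_getElem cf 0 hk').symm
      have hcc := countP_lt_succ xs k
      rw [hge, hgd2]
      push_cast at hcc ⊢
      omega
  -- the B side list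
  have hrange : PySem.List.pyRange 0 (m + 2) 1
      = (List.range (n + 1)).map (fun k => ((k : Nat) : Int)) := by
    rw [PySem.List.pyRange_one]
    have : (m + 2 - 0).toNat = n + 1 := by omega
    rw [this]
    simp
  rw [hrange, List.map_map]
  apply List.ext_getElem
  · simp [pvPref_length, hLn]
  · intro j h1 h2
    simp only [List.getElem_map, List.getElem_range, Function.comp_apply]
    cases j with
    | zero =>
      have h0 : xs.countP (fun x => x < (0 : Int)) = 0 :=
        List.countP_eq_zero.mpr (fun x hx => by simpa using not_lt.mpr (hpre x hx))
      rw [← List.countP_eq_length_filter]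
      simp only [Nat.cast_zero]
      rw [h0]
      simp
    | succ j =>
      have hjn : j < n := by
        simp [pvPref_length, hLn] at h1
        omega
      have hpg := pvPref_getElem cf 0 j (by rw [hLn]; exact hjn)
      show ((0 : Int) :: pvPref 0 cf)[j + 1]'_ = _
      simp only [List.getElem_cons_succ]
      rw [hpg, zero_add, key (j + 1) (by omega)]
      rw [← List.countP_eq_length_filter]
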